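-- pv_equiv track=rewrite | github.com/chan9367/3railFenceCipher | 33railFenceDecrypt.py | split_rails
-- ===== SOURCE A (Python) =====
-- def split_rails(message):
--     """Split message in two, always rounding UP for 1st row.
--         N = 3 which is the number of rails
--         L is the length of the message, which must be a multiple of 2(N-1) which in this case
--         means L must be a multiple of 4
--         K is the length of the first and third rail, which must be L/2(N-1)
--         2K is the length of the middle rail
--     """
--     N = 3
--     L = len(message)
--     K = int(L/(2*(N-1)))
--
--     row_1_len = K
--     row_2_len = 3*K
--
--
--     row1 = (message[:row_1_len])
--     row2 = (message[row_1_len:row_2_len])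
--     row3 = (message[row_2_len:])
--
--     """Need to pad all the rows into length of message for decryption later"""
--     newRow1 = ''
--     newRow2 = ''
--     newRow3 = '..'
--
--     for letter in row1:
--         newRow1 += letter
--         newRow1 += '...'
--
--     for letter in row2:
--         newRow2 += '.'
--         newRow2 += letter
--
--     for letter in row3:
--         newRow3 += letter
--         newRow3 += '...'
--     newRow3 = newRow3[:-2]
--
--     return newRow1, newRow2, newRow3
-- ===== SOURCE B (Python) =====
-- def split_rails(message):
--     # Positional generation: each padded rail is produced by iterating over its
--     # OUTPUT indices and deciding per index whether it is a pad dot or which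
--     # message character (by closed-form arithmetic index) lands there; no
--     # slicing, no per-character concatenation, no trimming.
--     L = len(message)
--     K = L // 4
--     r3 = L - 3 * K
--     new1 = ''.join(message[j // 4] if j % 4 == 0 else '.' for j in range(4 * K))
--     new2 = ''.join(message[K + j // 2] if j % 2 == 1 else '.' for j in range(4 * K))
--     new3 = ''.join(message[3 * K + j // 4] if j % 4 == 2 else '.' for j in range(4 * r3))
--     return new1, new2, new3
-- ===== Notes on version B (the rewrite author's own statement) =====
-- stated objective: alternative
-- what changed: B generates each padded rail positionally: it iterates over the rail's output indices and computes for each index whether it holds a pad dot or which message character (fetched by a closed-form arithmetic index 4i / 2i+1-style stride) belongs there, instead of A's slicing the message into three rails and sequentially concatenating each rail character with dot padding plus a final two-character trim.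
import Mathlib
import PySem

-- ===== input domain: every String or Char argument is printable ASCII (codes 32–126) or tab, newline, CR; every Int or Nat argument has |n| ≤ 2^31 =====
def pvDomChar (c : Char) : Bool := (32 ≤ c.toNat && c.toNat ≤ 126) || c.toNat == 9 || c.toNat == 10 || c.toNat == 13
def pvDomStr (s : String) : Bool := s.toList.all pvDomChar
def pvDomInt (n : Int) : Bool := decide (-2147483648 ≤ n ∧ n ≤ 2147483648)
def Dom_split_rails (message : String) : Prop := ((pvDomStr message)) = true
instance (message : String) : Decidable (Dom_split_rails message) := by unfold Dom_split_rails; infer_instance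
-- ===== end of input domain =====

-- B generates each padded rail by iterating over OUTPUT positions and computing per
-- position whether it is a dot or which message character it holds (arithmetic index),
-- instead of A's slice-then-concatenate-with-padding loops; objective: alternative, same cost.

-- ===== PORT A =====
-- int(L/(2*(3-1))): true division then truncation; for L = len(message) ≥ 0 this is
-- exactly Nat division by 4 (the float division is exact for every reachable length).
def split_rails (message : String) : String × String × String :=
  let s := message.toList
  let K : Nat := s.length / (2 * (3 - 1))
  let row1 := PySem.List.slice s none (some (K : Int))
  let row2 := PySem.List.slice s (some (K : Int)) (some ((3 * K : Nat) : Int))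
  let row3 := PySem.List.slice s (some ((3 * K : Nat) : Int)) none
  let newRow1 := row1.foldl (fun acc c => (acc ++ [c]) ++ ['.', '.', '.']) []
  let newRow2 := row2.foldl (fun acc c => (acc ++ ['.']) ++ [c]) []
  let newRow3 := row3.foldl (fun acc c => (acc ++ [c]) ++ ['.', '.', '.']) ['.', '.']
  let newRow3' := PySem.List.slice newRow3 none (some (-2))   -- newRow3[:-2]
  (String.ofList newRow1, String.ofList newRow2, String.ofList newRow3')

-- ===== PORT B =====
-- message[idx] is hand-ported as s.getD idx '.' — exact here, because every index B
-- computes (j/4, K + j/2, 3*K + j/4 for j in the stated ranges) is in range.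
def split_rails_alt (message : String) : String × String × String :=
  let s := message.toList
  let L := s.length
  let K : Nat := L / 4
  let r3 : Nat := L - 3 * K
  let new1 := (List.range (4 * K)).map (fun j => if j % 4 = 0 then s.getD (j / 4) '.' else '.')
  let new2 := (List.range (4 * K)).map (fun j => if j % 2 = 1 then s.getD (K + j / 2) '.' else '.')
  let new3 := (List.range (4 * r3)).map (fun j => if j % 4 = 2 then s.getD (3 * K + j / 4) '.' else '.')
  (String.ofList new1, String.ofList new2, String.ofList new3)

-- ===== PRECONDITION & SPEC =====
def Spec_split_rails (message : String) (out : String × String × String) : Prop := out = split_rails_alt message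
instance (message : String) (out : String × String × String) : Decidable (Spec_split_rails message out) := by unfold Spec_split_rails; infer_instance

-- ===== CLAIM (what is proved, stated in full; the proofs are below) =====
def Claim_equal_split_rails : Prop := ∀ (message : String), Dom_split_rails message → Spec_split_rails message (split_rails message)

-- ===== LEMMAS AND PROOFS =====

-- A's rail-1/rail-3 append loop is a flatMap over the rail.
lemma foldlA1 : ∀ (xs acc : List Char),
    xs.foldl (fun a c => (a ++ [c]) ++ ['.', '.', '.']) acc
      = acc ++ xs.flatMap (fun c => [c, '.', '.', '.']) := by
  intro xs
  induction xs with
  | nil => intro acc; simp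
  | cons c cs ih => intro acc; rw [List.foldl_cons, ih, List.flatMap_cons]; simp [List.append_assoc]

-- A's rail-2 append loop is a flatMap over the rail.
lemma foldlA2 : ∀ (xs acc : List Char),
    xs.foldl (fun a c => (a ++ ['.']) ++ [c]) acc
      = acc ++ xs.flatMap (fun c => ['.', c]) := by
  intro xs
  induction xs with
  | nil => intro acc; simp
  | cons c cs ih => intro acc; rw [List.foldl_cons, ih, List.flatMap_cons]; simp [List.append_assoc]

-- pushing A's '..' prefix on rail 3 through the flatMap
lemma shift_pat : ∀ (xs : List Char),
    ['.', '.'] ++ xs.flatMap (fun c => [c, '.', '.', '.'])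
      = xs.flatMap (fun c => ['.', '.', c, '.']) ++ ['.', '.'] := by
  intro xs
  induction xs with
  | nil => rfl
  | cons c cs ih =>
    simp only [List.flatMap_cons, ← List.append_assoc]
    simp [← ih]

-- one stride block of B's positional generation
lemma chunk : ∀ (m p : Nat), p < m → ∀ (c : Char),
    (List.range m).map (fun k => if k = p then c else '.')
      = List.replicate p '.' ++ c :: List.replicate (m - p - 1) '.' := by
  intro m
  induction m with
  | zero => intro p hp; omega
  | succ m ih =>
    intro p hp c
    rw [List.range_succ_eq_map, List.map_cons, List.map_map]
    cases p with
    | zero =>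
      simp only [List.replicate_zero, List.nil_append]
      have : ((fun k => if k = 0 then c else '.') ∘ Nat.succ) = fun _ : Nat => ('.' : Char) := by
        funext k; simp
      rw [this, List.map_const', List.length_range]
      simp
    | succ q =>
      have h1 : ((fun k => if k = q + 1 then c else '.') ∘ Nat.succ)
          = fun k : Nat => if k = q then c else '.' := by
        funext k; simp
      rw [h1, ih q (by omega) c]
      simp [List.replicate_succ]

-- B's positional generation over output indices equals the flatMap pattern of the rail.
lemma gather (m p : Nat) (hp : p < m) (g : Nat → Char) :
    ∀ (xs : List Char), (∀ i (h : i < xs.length), g i = xs[i]) →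
      (List.range (m * xs.length)).map (fun j => if j % m = p then g (j / m) else '.')
        = xs.flatMap (fun c => List.replicate p '.' ++ c :: List.replicate (m - p - 1) '.') := by
  intro xs
  induction xs using List.reverseRecOn with
  | nil => intro _; simp
  | append_singleton ys c ih =>
    intro h
    have hy : ∀ i (hi : i < ys.length), g i = ys[i] := by
      intro i hi
      have := h i (by simp; omega)
      rwa [List.getElem_append_left hi] at this
    have hc : g ys.length = c := by
      have := h ys.length (by simp)
      simpa using this
    have hlen : m * (ys ++ [c]).length = m * ys.length + m := by
      simp [Nat.mul_succ]
    rw [hlen, List.range_add, List.map_append, List.map_map, ih hy, List.flatMap_append]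
    congr 1
    have h2 : ((fun j => if j % m = p then g (j / m) else '.') ∘ (fun k => m * ys.length + k))
        = fun k : Nat => if (m * ys.length + k) % m = p then g ((m * ys.length + k) / m) else '.' := by
      funext k; rfl
    rw [h2]
    have h3 : (List.range m).map (fun k => if (m * ys.length + k) % m = p then g ((m * ys.length + k) / m) else '.')
        = (List.range m).map (fun k => if k = p then g ys.length else '.') := by
      apply List.map_congr_left
      intro k hk
      rw [List.mem_range] at hk
      have hm : (m * ys.length + k) % m = k := by
        rw [Nat.mul_add_mod]; exact Nat.mod_eq_of_lt hk
      have hd : (m * ys.length + k) / m = ys.length := by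
        rw [Nat.mul_add_div (by omega)]
        simp [Nat.div_eq_of_lt hk]
      rw [hm, hd]
    rw [h3, chunk m p hp, hc]
    simp

-- ===== VERDICT (by name: the statement is the Claim_ definition above) =====
theorem split_rails_spec : Claim_equal_split_rails := by
  intro message _
  unfold Spec_split_rails split_rails split_rails_alt
  simp only [PySem.List.slice_to_natCast, PySem.List.slice_natCast, PySem.List.slice_from_natCast]
  set s := message.toList with hs
  have hK4 : s.length / (2 * (3 - 1)) = s.length / 4 := by norm_num
  rw [hK4]
  set K := s.length / 4 with hKdef
  have hKle : 3 * K ≤ s.length := by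
    have := Nat.div_mul_le_self s.length 4
    omega
  simp only [Prod.mk.injEq]
  refine ⟨?_, ?_, ?_⟩
  · -- rail 1
    refine congrArg String.ofList ?_
    have hlen1 : (s.take K).length = K := by
      simp [List.length_take]; omega
    have hB := gather 4 0 (by omega) (fun i => s.getD i '.') (s.take K)
      (by
        intro i hi
        dsimp only
        rw [hlen1] at hi
        rw [List.getElem_take, List.getD_eq_getElem s '.' (by omega)])
    rw [hlen1] at hB
    beta_reduce at hB
    rw [foldlA1, hB]
    simp
  · -- rail 2
    refine congrArg String.ofList ?_
    have hlen2 : ((s.drop K).take (3 * K - K)).length = 2 * K := by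
      simp [List.length_take, List.length_drop]; omega
    have hB := gather 2 1 (by omega) (fun i => s.getD (K + i) '.') ((s.drop K).take (3 * K - K))
      (by
        intro i hi
        dsimp only
        rw [hlen2] at hi
        have hKi : K + i < s.length := by omega
        rw [List.getElem_take, List.getElem_drop, List.getD_eq_getElem s '.' hKi])
    rw [hlen2] at hB
    have h42 : 2 * (2 * K) = 4 * K := by ring
    rw [h42] at hB
    beta_reduce at hB
    rw [foldlA2, hB]
    simp
  · -- rail 3
    refine congrArg String.ofList ?_
    have hlen3 : (s.drop (3 * K)).length = s.length - 3 * K := by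
      simp [List.length_drop]
    have hB := gather 4 2 (by omega) (fun i => s.getD (3 * K + i) '.') (s.drop (3 * K))
      (by
        intro i hi
        dsimp only
        rw [hlen3] at hi
        rw [List.getElem_drop, List.getD_eq_getElem s '.' (by omega)])
    rw [hlen3] at hB
    beta_reduce at hB
    rw [foldlA1, hB]
    rw [PySem.List.slice_to_neg_ofNat _ 2 (by omega)]
    rw [show (['.', '.'] : List Char) ++ (s.drop (3 * K)).flatMap (fun c => [c, '.', '.', '.'])
          = (s.drop (3 * K)).flatMap (fun c => ['.', '.', c, '.']) ++ ['.', '.'] from shift_pat _]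
    have hl2 : ((s.drop (3 * K)).flatMap (fun c => ['.', '.', c, '.']) ++ ['.', '.'] : List Char).length - 2
        = ((s.drop (3 * K)).flatMap (fun c => ['.', '.', c, '.'])).length := by
      simp
    rw [hl2, List.take_left]
    simp
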